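-- pv_equiv track=rewrite | github.com/BuiThiThanhTrang/BioinformaticsCoursera | Course_2_19_Cyclopeptide_Scoring_Problem/Course_2_19_Cyclopeptide_Scoring_Problem.py | Score
-- ===== SOURCE A (Python) =====
-- from collections import Counter
--
-- def Cyclospectrum(Peptide):
--     l = len(Peptide)
--     Peptide += Peptide[:-1]
--     PrefixMass = [0]
--     for i in Peptide:
--         PrefixMass.append(PrefixMass[-1] + AminoAcidMass[i])
--     TheoreticalSpectrum = [0]
--
--     for i in range(1, l): # i is the length of substrings
--         for j in range(l): # j is the starting position of a substring
--             TheoreticalSpectrum.append(PrefixMass[j+i] - PrefixMass[j])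
--     TheoreticalSpectrum.append(PrefixMass[l])
--     return sorted(TheoreticalSpectrum)
--     pass
--
-- def Score(peptide, spectrum):
--     peptide_spectrum = Cyclospectrum(peptide)
--     peptide_counter = Counter(peptide_spectrum)
--     spectrum_counter = Counter(spectrum)
--     s = 0
--     for mass in peptide_counter:
--         s += min(peptide_counter[mass], spectrum_counter[mass])
--     return s
--
-- AminoAcidMass = {'G': 57, 'A': 71, 'S': 87, 'P': 97, 'V': 99, 'T': 101, 'C': 103, 'I': 113,
--                  'L': 113, 'N': 114, 'D': 115, 'K': 128, 'Q': 128, 'E': 129, 'M': 131,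
--                  'H': 137, 'F': 147, 'R': 156, 'Y': 163, 'W': 186}
-- ===== SOURCE B (Python) =====
-- AminoAcidMass = {'G': 57, 'A': 71, 'S': 87, 'P': 97, 'V': 99, 'T': 101, 'C': 103, 'I': 113,
--                  'L': 113, 'N': 114, 'D': 115, 'K': 128, 'Q': 128, 'E': 129, 'M': 131,
--                  'H': 137, 'F': 147, 'R': 156, 'Y': 163, 'W': 186}
--
-- def Score(peptide, spectrum):
--     l = len(peptide)
--     masses = [AminoAcidMass[c] for c in peptide]
--     ext = masses + masses
--     spec = [0]
--     for i in range(1, l):          # length of a proper cyclic subpeptide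
--         for j in range(l):         # starting position
--             spec.append(sum(ext[j:j+i]))
--     spec.append(sum(masses))
--     return sum(min(spec.count(m), spectrum.count(m)) for m in set(spec))
-- ===== Notes on version B (the rewrite author's own statement) =====
-- stated objective: simpler
-- what changed: B drops A's prefix-mass table and index subtraction: it sums each cyclic subpeptide's masses directly from a doubled mass list via slicing, and scores with plain list.count over the distinct masses instead of Counter objects; Pre_ excludes only peptides with a letter outside the 20-amino-acid alphabet, on which both A and B raise KeyError.
import Mathlib
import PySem

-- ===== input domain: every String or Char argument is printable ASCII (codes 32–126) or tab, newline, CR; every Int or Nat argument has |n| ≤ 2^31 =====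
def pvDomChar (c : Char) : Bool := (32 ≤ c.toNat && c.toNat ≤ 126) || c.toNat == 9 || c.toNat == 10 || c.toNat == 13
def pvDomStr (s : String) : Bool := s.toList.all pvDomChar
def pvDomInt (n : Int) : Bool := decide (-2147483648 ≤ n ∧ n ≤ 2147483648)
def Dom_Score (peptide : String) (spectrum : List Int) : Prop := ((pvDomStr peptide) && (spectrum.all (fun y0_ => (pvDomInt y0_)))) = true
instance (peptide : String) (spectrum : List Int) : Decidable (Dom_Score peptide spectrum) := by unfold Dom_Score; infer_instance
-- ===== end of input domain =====

-- B replaces A's prefix-mass table and index subtraction by direct summation of each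
-- cyclic subpeptide sliced from a doubled mass list, and scores with plain list.count
-- over the distinct masses instead of Counter objects (objective: simpler, not faster).

-- ===== PORT A =====
-- the module-level dict AminoAcidMass, shared by both Pythons
def AminoAcidMassD : PySem.Dict Char Int := PySem.Dict.ofList
  [('G',57),('A',71),('S',87),('P',97),('V',99),('T',101),('C',103),('I',113),
   ('L',113),('N',114),('D',115),('K',128),('Q',128),('E',129),('M',131),
   ('H',137),('F',147),('R',156),('Y',163),('W',186)]

-- AminoAcidMass[c]; Python raises KeyError on a missing key — Pre_Score excludes those peptides
def massD (c : Char) : Int := AminoAcidMassD.getD c 0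

def Cyclospectrum (Peptide : String) : List Int :=
  let l : Int := (Peptide.toList.length : Int)                       -- l = len(Peptide)
  let Peptide2 : List Char :=                                        -- Peptide += Peptide[:-1]
    Peptide.toList ++ PySem.List.slice Peptide.toList none (some (-1))
  let PrefixMass : List Int :=                                       -- for i in Peptide: PrefixMass.append(PrefixMass[-1] + AminoAcidMass[i])
    Peptide2.foldl (fun pm c => pm ++ [PySem.List.pyGetD pm (-1) 0 + massD c]) [(0:Int)]
  let spec : List Int :=                                             -- nested loops over i, j
    (PySem.List.pyRange 1 l 1).foldl (fun acc i =>
      (PySem.List.pyRange 0 l 1).foldl (fun acc j =>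
        acc ++ [PySem.List.pyGetD PrefixMass (j+i) 0 - PySem.List.pyGetD PrefixMass j 0]) acc) [(0:Int)]
  let spec2 : List Int := spec ++ [PySem.List.pyGetD PrefixMass l 0] -- append PrefixMass[l]
  PySem.List.sorted spec2 (fun x => x) false                         -- return sorted(...)

def Score (peptide : String) (spectrum : List Int) : Int :=
  let peptide_spectrum := Cyclospectrum peptide
  let peptide_counter := PySem.Dict.counter peptide_spectrum
  let spectrum_counter := PySem.Dict.counter spectrum
  peptide_counter.keys.foldl                                          -- for mass in peptide_counter: s += min(...)
    (fun s mass => s + min (peptide_counter.getD mass 0) (spectrum_counter.getD mass 0)) 0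

-- ===== PORT B =====
def Score_alt (peptide : String) (spectrum : List Int) : Int :=
  let l : Int := (peptide.toList.length : Int)
  let masses : List Int := peptide.toList.map massD
  let ext : List Int := masses ++ masses
  let spec : List Int :=
    (PySem.List.pyRange 1 l 1).foldl (fun acc i =>
      (PySem.List.pyRange 0 l 1).foldl (fun acc j =>
        acc ++ [(PySem.List.slice ext (some j) (some (j+i))).sum]) acc) [(0:Int)]
  let spec2 : List Int := spec ++ [masses.sum]
  (PySem.Set.ofList spec2).foldl
    (fun s m => s + min (spec2.count m : Int) (spectrum.count m : Int)) 0

-- ===== PRECONDITION & SPEC =====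
-- Pre_ excludes exactly the peptides containing a letter outside the 20-amino-acid
-- alphabet: there Python A (and B) raises KeyError.
def Pre_Score (peptide : String) (spectrum : List Int) : Prop :=
  (peptide.toList.all (fun c => "GASPVTCILNDKQEMHFRYW".toList.contains c)) = true
instance (peptide : String) (spectrum : List Int) : Decidable (Pre_Score peptide spectrum) := by
  unfold Pre_Score; infer_instance
def pvWitness_Score : String × List Int := ("GAS", [57, 71, 87, 128])

def Spec_Score (peptide : String) (spectrum : List Int) (out : Int) : Prop := out = Score_alt peptide spectrum
instance (peptide : String) (spectrum : List Int) (out : Int) : Decidable (Spec_Score peptide spectrum out) := by unfold Spec_Score; infer_instance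

-- ===== CLAIM (what is proved, stated in full; the proofs are below) =====
def Claim_equal_Score : Prop := ∀ (peptide : String) (spectrum : List Int), Dom_Score peptide spectrum → Pre_Score peptide spectrum → Spec_Score peptide spectrum (Score peptide spectrum)

-- ===== LEMMAS AND PROOFS =====

-- A's PrefixMass loop builds the prefix sums of massD over its input
theorem prefix_scan (xs : List Char) (ys : List Int) (b : Int) :
    xs.foldl (fun pm c => pm ++ [PySem.List.pyGetD pm (-1) 0 + massD c]) (ys ++ [b])
      = ys ++ (List.range (xs.length + 1)).map (fun k => b + ((xs.take k).map massD).sum) := by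
  induction xs generalizing ys b with
  | nil => simp
  | cons c t ih =>
      rw [List.foldl_cons, PySem.List.pyGetD_neg_one_append_singleton,
          show (ys ++ [b]) ++ [b + massD c] = (ys ++ [b]) ++ [b + massD c] from rfl, ih]
      simp only [List.length_cons, List.range_succ_eq_map, List.map_cons, List.map_map,
        List.take_zero, List.map_nil, List.sum_nil, add_zero, List.append_assoc,
        List.singleton_append]
      simp [List.take_succ_cons]
      intro a _
      ring

-- an append-singleton inner loop is a map
theorem foldl_append_one {α β : Type} (l : List α) (f : α → β) (acc : List β) :
    l.foldl (fun a x => a ++ [f x]) acc = acc ++ l.map f := by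
  induction l generalizing acc with
  | nil => simp
  | cons x t ih => simp [ih, List.append_assoc]

-- the nested append loops are a flatMap
theorem nested_foldl (r1 r2 : List Int) (g : Int → Int → Int) (acc : List Int) :
    r1.foldl (fun a i => r2.foldl (fun a j => a ++ [g i j]) a) acc
      = acc ++ r1.flatMap (fun i => r2.map (g i)) := by
  induction r1 generalizing acc with
  | nil => simp
  | cons i t ih =>
      rw [List.foldl_cons, foldl_append_one, ih]
      simp [List.flatMap_cons, List.append_assoc]

-- summing a foldl accumulator
theorem foldl_add_eq_sum_map {α : Type} (l : List α) (f : α → Int) (s0 : Int) :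
    l.foldl (fun s m => s + f m) s0 = s0 + (l.map f).sum := by
  induction l generalizing s0 with
  | nil => simp
  | cons x t ih => simp [ih, add_assoc]


-- Peptide[:-1] is take (len-1)
theorem hslice_core (pep : List Char) :
    PySem.List.slice pep none (some (-1)) = pep.take (pep.length - 1) := by
  have h := PySem.List.slice_to_neg_natCast (xs := pep) (k := 1) (by norm_num)
  simpa using h

-- the prefix-mass list in closed form
theorem prefix_scan_core (xs : List Char) :
    xs.foldl (fun pm c => pm ++ [PySem.List.pyGetD pm (-1) 0 + massD c]) [(0:Int)]
      = (List.range (xs.length + 1)).map (fun k => 0 + ((xs.take k).map massD).sum) := by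
  simpa using prefix_scan xs [] 0

-- indexing the closed-form prefix list
theorem pm_getD (dbl : List Char) (k : Nat) (hk : k ≤ dbl.length) :
    ((List.range (dbl.length + 1)).map (fun k => 0 + ((dbl.take k).map massD).sum)).getD k 0
      = ((dbl.take k).map massD).sum := by
  rw [List.getD_eq_getElem?_getD]
  simp [Nat.lt_succ_of_le hk]

-- equal (nj+ni)-prefixes give equal (drop nj, take ni) windows
theorem take_window_eq (xs ys : List Int) (nj ni : Nat)
    (h : xs.take (nj + ni) = ys.take (nj + ni)) :
    (xs.drop nj).take ni = (ys.drop nj).take ni := by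
  have hmin : min nj (nj + ni) = nj := by omega
  have h1 : xs.take nj = ys.take nj := by
    have h2 := congrArg (List.take nj) h
    simpa [List.take_take, hmin] using h2
  have h3 := h
  rw [List.take_add, List.take_add, h1] at h3
  exact List.append_cancel_left h3

-- the doubled mass list and the mass list of the doubled peptide share every
-- prefix of length at most 2*len-1
theorem take_ext_eq (masses : List Int) (m : Nat)
    (hm : m ≤ masses.length + (masses.length - 1)) :
    (masses ++ masses).take m = (masses ++ masses.take (masses.length - 1)).take m := by
  have hmin : min (m - masses.length) (masses.length - 1) = m - masses.length :=
    Nat.min_eq_left (by omega)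
  rw [List.take_append, List.take_append, List.take_take, hmin]

-- one cell of the nested loops: prefix-sum difference = sum of the slice
theorem core_cell (pep : List Char) (i j : Int)
    (hi1 : 1 ≤ i) (hi2 : i < (pep.length : Int))
    (hj1 : 0 ≤ j) (hj2 : j < (pep.length : Int)) :
    PySem.List.pyGetD ((List.range ((pep ++ pep.take (pep.length - 1)).length + 1)).map
        (fun k => 0 + (((pep ++ pep.take (pep.length - 1)).take k).map massD).sum)) (j + i) 0
      - PySem.List.pyGetD ((List.range ((pep ++ pep.take (pep.length - 1)).length + 1)).map
        (fun k => 0 + (((pep ++ pep.take (pep.length - 1)).take k).map massD).sum)) j 0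
    = (PySem.List.slice (pep.map massD ++ pep.map massD) (some j) (some (j + i))).sum := by
  obtain ⟨ni, rfl⟩ : ∃ n : Nat, (n : Int) = i := ⟨i.toNat, Int.toNat_of_nonneg (by omega)⟩
  obtain ⟨nj, rfl⟩ : ∃ n : Nat, (n : Int) = j := ⟨j.toNat, Int.toNat_of_nonneg hj1⟩
  have hni1 : 1 ≤ ni := by exact_mod_cast hi1
  have hni2 : ni < pep.length := by exact_mod_cast hi2
  have hnj2 : nj < pep.length := by exact_mod_cast hj2
  have hdlen : (pep ++ pep.take (pep.length - 1)).length = pep.length + (pep.length - 1) := by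
    simp [List.length_take]
  rw [PySem.List.slice_natCast_add]
  rw [show ((nj : Int) + (ni : Int)) = ((nj + ni : Nat) : Int) by push_cast; ring]
  rw [PySem.List.pyGetD_natCast, PySem.List.pyGetD_natCast]
  rw [pm_getD _ _ (by omega), pm_getD _ _ (by omega)]
  rw [List.take_add, List.map_append, List.sum_append, add_sub_cancel_left]
  rw [List.map_take, List.map_drop, List.map_append, List.map_take]
  refine congrArg List.sum ((take_window_eq _ _ nj ni ?_).symm)
  have h := take_ext_eq (pep.map massD) (nj + ni) (by simp only [List.length_map]; omega)
  simpa only [List.length_map] using h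

-- the appended full-peptide mass
theorem last_cell (pep : List Char) :
    PySem.List.pyGetD ((List.range ((pep ++ pep.take (pep.length - 1)).length + 1)).map
        (fun k => 0 + (((pep ++ pep.take (pep.length - 1)).take k).map massD).sum)) (pep.length : Int) 0
      = (pep.map massD).sum := by
  rw [PySem.List.pyGetD_natCast]
  rw [pm_getD _ _ (by simp [List.length_take])]
  have h : (pep ++ pep.take (pep.length - 1)).take pep.length = pep := by
    rw [List.take_append]
    simp
  rw [h]

-- sorting before counting does not change the score sum
theorem sorted_score_sum (S spectrum : List Int) :
    ((PySem.Set.ofList (PySem.List.sorted S (fun x => x) false)).map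
       (fun m => min ((PySem.List.sorted S (fun x => x) false).count m : Int) (spectrum.count m : Int))).sum
    = ((PySem.Set.ofList S).map (fun m => min (S.count m : Int) (spectrum.count m : Int))).sum := by
  have hfun : (fun m => min (((PySem.List.sorted S (fun x => x) false).count m : Int)) ((spectrum.count m : Int)))
      = fun m => min ((S.count m : Int)) ((spectrum.count m : Int)) := by
    funext m
    rw [(PySem.List.sorted_perm S (fun x => x) false).count_eq m]
  rw [hfun]
  have hp : (PySem.Set.ofList (PySem.List.sorted S (fun x => x) false)).Perm (PySem.Set.ofList S) := by
    refine (List.perm_ext_iff_of_nodup (PySem.Set.nodup_ofList _) (PySem.Set.nodup_ofList _)).mpr ?_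
    intro x
    simp [PySem.Set.mem_ofList, PySem.List.mem_sorted]
  exact (hp.map _).sum_eq

-- the unsorted spectra built by A and B are the SAME list
theorem spec_eq (peptide : String) :
    ((PySem.List.pyRange 1 (peptide.toList.length : Int) 1).foldl (fun acc i =>
        (PySem.List.pyRange 0 (peptide.toList.length : Int) 1).foldl (fun acc j =>
          acc ++ [PySem.List.pyGetD
              ((peptide.toList ++ PySem.List.slice peptide.toList none (some (-1))).foldl
                (fun pm c => pm ++ [PySem.List.pyGetD pm (-1) 0 + massD c]) [(0:Int)]) (j + i) 0
            - PySem.List.pyGetD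
              ((peptide.toList ++ PySem.List.slice peptide.toList none (some (-1))).foldl
                (fun pm c => pm ++ [PySem.List.pyGetD pm (-1) 0 + massD c]) [(0:Int)]) j 0]) acc) [(0:Int)])
      ++ [PySem.List.pyGetD
            ((peptide.toList ++ PySem.List.slice peptide.toList none (some (-1))).foldl
              (fun pm c => pm ++ [PySem.List.pyGetD pm (-1) 0 + massD c]) [(0:Int)]) (peptide.toList.length : Int) 0]
    = ((PySem.List.pyRange 1 (peptide.toList.length : Int) 1).foldl (fun acc i =>
        (PySem.List.pyRange 0 (peptide.toList.length : Int) 1).foldl (fun acc j =>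
          acc ++ [(PySem.List.slice (peptide.toList.map massD ++ peptide.toList.map massD)
              (some j) (some (j + i))).sum]) acc) [(0:Int)])
      ++ [(peptide.toList.map massD).sum] := by
  rw [hslice_core]
  rw [prefix_scan_core]
  rw [nested_foldl, nested_foldl]
  congr 1
  · congr 1
    rw [List.flatMap_def, List.flatMap_def]
    refine congrArg List.flatten (List.map_congr_left ?_)
    intro i hi
    refine List.map_congr_left ?_
    intro j hj
    rw [PySem.List.mem_pyRange_one] at hi hj
    exact core_cell peptide.toList i j hi.1 hi.2 hj.1 hj.2
  · rw [last_cell]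

-- ===== VERDICT (by name: the statement is the Claim_ definition above) =====
theorem Score_spec : Claim_equal_Score := by
  intro peptide spectrum _ _
  unfold Spec_Score Score Score_alt Cyclospectrum
  dsimp only
  rw [spec_eq peptide]
  rw [PySem.Dict.keys_counter]
  simp only [PySem.Dict.getD_counter]
  rw [foldl_add_eq_sum_map, foldl_add_eq_sum_map]
  rw [sorted_score_sum]
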